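-- pv_equiv track=rewrite | github.com/GreatWizard/vscode-grammalecte | grammalecte/fr/cregex.py | mbNomNotAdj
-- ===== SOURCE A (Python) =====
-- def mbNomNotAdj (lMorph):
--     "returns True if one morphology is “nom”, but not “adjectif”"
--     bResult = False
--     for s in lMorph:
--         if ":A" in s:
--             return False
--         if ":N" in s:
--             bResult = True
--     return bResult
-- ===== SOURCE B (Python) =====
-- def mbNomNotAdj(lMorph):
--     "returns True if one morphology is “nom”, but not “adjectif”"
--     return not any(":A" in s for s in lMorph) and any(":N" in s for s in lMorph)
-- ===== Notes on version B (the rewrite author's own statement) =====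
-- stated objective: simpler
-- what changed: Replaces the stateful early-exit loop with two short-circuiting any() predicate scans combined by 'and' (no accumulator, no explicit loop).
import Mathlib
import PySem

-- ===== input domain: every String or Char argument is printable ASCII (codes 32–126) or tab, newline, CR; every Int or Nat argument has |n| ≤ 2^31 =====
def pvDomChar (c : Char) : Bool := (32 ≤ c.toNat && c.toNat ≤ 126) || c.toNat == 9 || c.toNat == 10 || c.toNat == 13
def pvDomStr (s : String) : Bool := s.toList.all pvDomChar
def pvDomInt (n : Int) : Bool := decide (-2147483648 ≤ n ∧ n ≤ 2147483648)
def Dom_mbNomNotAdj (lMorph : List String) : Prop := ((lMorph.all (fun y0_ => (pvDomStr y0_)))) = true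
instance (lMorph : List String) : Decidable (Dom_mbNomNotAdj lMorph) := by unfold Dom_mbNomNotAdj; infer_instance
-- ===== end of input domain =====

-- B replaces A's stateful early-exit loop by two short-circuit `any` predicate scans; objective: simpler.

-- ===== PORT A =====
-- the for-loop with the bResult accumulator and the early `return False`
def mbNomNotAdjLoop : List String → Bool → Bool
  | [], bResult => bResult
  | s :: rest, bResult =>
    if PySem.Str.isIn ":A" s then false
    else mbNomNotAdjLoop rest (if PySem.Str.isIn ":N" s then true else bResult)

def mbNomNotAdj (lMorph : List String) : Bool := mbNomNotAdjLoop lMorph false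

-- ===== PORT B =====
def mbNomNotAdj_alt (lMorph : List String) : Bool :=
  !(lMorph.any (fun s => PySem.Str.isIn ":A" s)) && lMorph.any (fun s => PySem.Str.isIn ":N" s)

-- ===== PRECONDITION & SPEC =====
def Spec_mbNomNotAdj (lMorph : List String) (out : Bool) : Prop := out = mbNomNotAdj_alt lMorph
instance (lMorph : List String) (out : Bool) : Decidable (Spec_mbNomNotAdj lMorph out) := by unfold Spec_mbNomNotAdj; infer_instance

-- ===== CLAIM (what is proved, stated in full; the proofs are below) =====
def Claim_equal_mbNomNotAdj : Prop := ∀ (lMorph : List String), Dom_mbNomNotAdj lMorph → Spec_mbNomNotAdj lMorph (mbNomNotAdj lMorph)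

-- ===== LEMMAS AND PROOFS =====
theorem mbNomNotAdjLoop_eq (lMorph : List String) (b : Bool) :
    mbNomNotAdjLoop lMorph b =
      (!(lMorph.any (fun s => PySem.Str.isIn ":A" s)) &&
        (b || lMorph.any (fun s => PySem.Str.isIn ":N" s))) := by
  induction lMorph generalizing b with
  | nil => simp [mbNomNotAdjLoop]
  | cons s rest ih =>
    simp only [mbNomNotAdjLoop, List.any_cons, PySem.Str.isIn_eq, ih]
    cases PySem.Chars.isIn [':', 'A'] s.toList <;>
      cases PySem.Chars.isIn [':', 'N'] s.toList <;>
        cases b <;> simp [Bool.and_assoc]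

-- ===== VERDICT (by name: the statement is the Claim_ definition above) =====
theorem mbNomNotAdj_spec : Claim_equal_mbNomNotAdj := by
  intro lMorph _
  unfold Spec_mbNomNotAdj mbNomNotAdj mbNomNotAdj_alt
  simp [mbNomNotAdjLoop_eq]
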